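-- pv_equiv track=rewrite | github.com/JKR8/querytorque_v8 | packages/qt-sql/qt_sql/optimization/plan_analyzer.py | _find_original_span
-- ===== SOURCE A (Python) =====
-- def _normalize_whitespace(s: str) -> str:
--     """Normalize whitespace for fuzzy matching."""
--     # Collapse all whitespace to single spaces
--     return " ".join(s.split())
--
-- def _find_original_span(sql: str, normalized_search: str) -> tuple[int, int] | None:
--     """Find the original span in sql that matches normalized_search.
--
--     Returns (start, end) indices or None if not found.
--     """
--     # Try to find a substring of sql that normalizes to normalized_search
--     # Use a sliding window approach
--     sql_chars = list(sql)
--     n = len(sql)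
--
--     # Find potential start points (non-whitespace that matches start of search)
--     search_first_word = normalized_search.split()[0] if normalized_search.split() else ""
--     if not search_first_word:
--         return None
--
--     i = 0
--     while i < n:
--         # Skip leading whitespace
--         while i < n and sql[i].isspace():
--             i += 1
--         if i >= n:
--             break
--
--         # Check if this could be the start
--         if sql[i:i+len(search_first_word)] == search_first_word:
--             # Try to find the end
--             for j in range(i + 1, n + 1):
--                 candidate = sql[i:j]
--                 if _normalize_whitespace(candidate) == normalized_search:
--                     return (i, j)
--                 # If normalized is longer than search, stop
--                 if len(_normalize_whitespace(candidate)) > len(normalized_search):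
--                     break
--         i += 1
--
--     return None
-- ===== SOURCE B (Python) =====
-- def _match_from(sql, i, search):
--     """Two-pointer incremental match: does some sql[i:j] normalize to search?
--     Returns the smallest such j, or None. Whitespace runs in sql must line up
--     with single ' ' characters in search."""
--     n, m = len(sql), len(search)
--     j, k = i, 0
--     while j < n:
--         c = sql[j]
--         if c.isspace():
--             # collapse the whitespace run; it contributes one ' ' only if text follows
--             while j < n and sql[j].isspace():
--                 j += 1
--             if j >= n or k >= m or search[k] != ' ':
--                 return None
--             k += 1
--         else:
--             if k >= m or search[k] != c:
--                 return None
--             k += 1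
--             j += 1
--             if k == m:
--                 return j
--     return None
--
--
-- def _find_original_span(sql: str, normalized_search: str):
--     """Find the original span in sql that matches normalized_search.
--
--     Returns (start, end) indices or None if not found.
--     """
--     if not normalized_search:
--         return None
--     for i in range(len(sql)):
--         if sql[i].isspace():
--             continue
--         end = _match_from(sql, i, normalized_search)
--         if end is not None:
--             return (i, end)
--     return None
-- ===== Notes on version B (the rewrite author's own statement) =====
-- stated objective: faster
-- what changed: Replaces A's per-start, per-end slice-and-renormalize search (rebuilding ' '.join(candidate.split()) for every candidate) with a single incremental two-pointer matcher that walks sql once per start, collapsing whitespace runs on the fly against the search string.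
import Mathlib
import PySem

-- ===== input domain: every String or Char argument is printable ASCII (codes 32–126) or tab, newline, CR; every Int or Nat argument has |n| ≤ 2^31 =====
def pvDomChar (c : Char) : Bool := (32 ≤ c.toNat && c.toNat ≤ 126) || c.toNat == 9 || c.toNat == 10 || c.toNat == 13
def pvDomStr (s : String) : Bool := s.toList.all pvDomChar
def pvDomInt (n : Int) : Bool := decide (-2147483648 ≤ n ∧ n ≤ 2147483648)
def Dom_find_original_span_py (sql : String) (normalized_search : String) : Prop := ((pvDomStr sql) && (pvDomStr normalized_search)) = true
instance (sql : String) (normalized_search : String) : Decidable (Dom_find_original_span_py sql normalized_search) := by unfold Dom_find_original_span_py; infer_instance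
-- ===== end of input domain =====

-- B replaces A's per-candidate slice-and-renormalize scan with an incremental
-- two-pointer matcher (one ' '-collapsing walk per start); return value only, no mutation.

-- ===== PORT A =====

-- _normalize_whitespace: " ".join(s.split())
def normA (cs : List Char) : List Char := PySem.Chars.join [' '] (PySem.Chars.split₀ cs)

-- the inner `for j in range(i + 1, n + 1)` loop of A: `cand` is sql[i:j-1] built so far
-- (candidate = sql[i:j] is the same value as cand ++ [c]); j is the absolute index
def innerA (S : List Char) (cand rest : List Char) (j : Nat) : Option Nat :=
  match rest with
  | [] => none
  | c :: rs =>
    let cand' := cand ++ [c]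
    if normA cand' = S then some (j + 1)
    else if S.length < (normA cand').length then none
    else innerA S cand' rs (j + 1)

-- the outer `while i < n` loop; the leading-whitespace skip advances i by 1 per space,
-- exactly as one combined iteration here; `sql[i:i+len(fw)] == fw` is `take fw.length`
def outerA (S fw : List Char) (i : Nat) (rest : List Char) : Option (List Int) :=
  match rest with
  | [] => none
  | c :: rs =>
    if PySem.Chars.isspace c then outerA S fw (i + 1) rs
    else if (c :: rs).take fw.length = fw then
      match innerA S [] (c :: rs) i with
      | some j => some [(i : Int), (j : Int)]
      | none => outerA S fw (i + 1) rs
    else outerA S fw (i + 1) rs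

def find_original_span_py (sql : String) (normalized_search : String) : Option (List Int) :=
  let S := normalized_search.toList
  -- search_first_word = normalized_search.split()[0] if normalized_search.split() else ""
  let fw : List Char := match PySem.Chars.split₀ S with | [] => [] | w :: _ => w
  if fw = [] then none
  else outerA S fw 0 sql.toList

-- ===== PORT B =====

-- _match_from: two-pointer incremental match; srem is the unmatched tail of search,
-- j the absolute sql index; the inner whitespace-run while-loop is the takeWhile/dropWhile pair
def runB (srem rest : List Char) (j : Nat) : Option Nat :=
  match rest with
  | [] => none
  | c :: rs =>
    if PySem.Chars.isspace c then
      let rest' := rs.dropWhile PySem.Chars.isspace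
      let skipped := 1 + (rs.takeWhile PySem.Chars.isspace).length
      if rest' = [] then none
      else match srem with
        | [] => none
        | s :: srem' => if s = ' ' then runB srem' rest' (j + skipped) else none
    else
      match srem with
      | s :: srem' => if s = c then (if srem' = [] then some (j + 1) else runB srem' rs (j + 1)) else none
      | [] => none
  termination_by rest.length
  decreasing_by
  · simpa using Nat.lt_succ_of_le (List.length_dropWhile_le _ _)
  · simp

-- `for i in range(len(sql))` with the isspace `continue`
def outerB (S : List Char) (i : Nat) (rest : List Char) : Option (List Int) :=
  match rest with
  | [] => none
  | c :: rs =>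
    if PySem.Chars.isspace c then outerB S (i + 1) rs
    else match runB S (c :: rs) i with
      | some j => some [(i : Int), (j : Int)]
      | none => outerB S (i + 1) rs

def find_original_span_py_alt (sql : String) (normalized_search : String) : Option (List Int) :=
  if normalized_search.toList = [] then none
  else outerB normalized_search.toList 0 sql.toList

-- ===== PRECONDITION & SPEC =====
def Spec_find_original_span_py (sql : String) (normalized_search : String) (out : Option (List Int)) : Prop := out = find_original_span_py_alt sql normalized_search
instance (sql : String) (normalized_search : String) (out : Option (List Int)) : Decidable (Spec_find_original_span_py sql normalized_search out) := by unfold Spec_find_original_span_py; infer_instance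

-- ===== CLAIM (what is proved, stated in full; the proofs are below) =====
def Claim_equal_find_original_span_py : Prop := ∀ (sql : String) (normalized_search : String), Dom_find_original_span_py sql normalized_search → Spec_find_original_span_py sql normalized_search (find_original_span_py sql normalized_search)

-- ===== LEMMAS AND PROOFS =====

-- words of a string: the chunks `s.split()` returns
def words (cs : List Char) : List (List Char) :=
  match cs with
  | [] => []
  | c :: rest =>
    if PySem.Chars.isspace c then words rest
    else (c :: rest.takeWhile (fun d => !PySem.Chars.isspace d)) ::
          words (rest.dropWhile (fun d => !PySem.Chars.isspace d))
  termination_by cs.length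
  decreasing_by
  · simp
  · simpa using Nat.lt_succ_of_le (List.length_dropWhile_le _ _)

-- " ".join on the word list
def nfW (ws : List (List Char)) : List Char :=
  match ws with
  | [] => []
  | [w] => w
  | w :: ws => w ++ ' ' :: nfW ws

-- the normal form used throughout the proofs
def nf (cs : List Char) : List Char := nfW (words cs)

-- reference first-hit scan: the common meaning of A's inner loop and B's matcher
def scan (S cand rest : List Char) (j : Nat) : Option Nat :=
  match rest with
  | [] => none
  | c :: rs => if nf (cand ++ [c]) = S then some (j + 1) else scan S (cand ++ [c]) rs (j + 1)

theorem words_cons_space {c : Char} (rest : List Char) (h : PySem.Chars.isspace c = true) :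
    words (c :: rest) = words rest := by
  rw [words]; simp [h]

theorem words_cons_nonspace {c : Char} (rest : List Char) (h : PySem.Chars.isspace c = false) :
    words (c :: rest) = (c :: rest.takeWhile (fun d => !PySem.Chars.isspace d)) ::
      words (rest.dropWhile (fun d => !PySem.Chars.isspace d)) := by
  rw [words]; simp [h]

theorem words_all_space {cs : List Char} (h : ∀ c ∈ cs, PySem.Chars.isspace c = true) :
    words cs = [] := by
  induction cs with
  | nil => rw [words]
  | cons c rest ih =>
    rw [words_cons_space rest (h c (by simp))]
    exact ih (fun d hd => h d (by simp [hd]))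

theorem words_nil : words [] = [] := by rw [words]

theorem words_mem_aux : ∀ (N : Nat) (cs : List Char), cs.length ≤ N → ∀ w ∈ words cs,
    w ≠ [] ∧ ∀ d ∈ w, PySem.Chars.isspace d = false := by
  intro N
  induction N with
  | zero =>
    intro cs h
    have : cs = [] := List.length_eq_zero_iff.mp (Nat.le_zero.mp h)
    subst this; simp [words_nil]
  | succ n ih =>
    intro cs hlen w hw
    match cs with
    | [] => simp [words_nil] at hw
    | c :: rest =>
      by_cases hc : PySem.Chars.isspace c = true
      · rw [words_cons_space rest hc] at hw
        exact ih rest (by simpa using Nat.le_of_succ_le_succ hlen) w hw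
      · rw [words_cons_nonspace rest (by simpa using hc)] at hw
        rcases List.mem_cons.mp hw with h | h
        · subst h
          refine ⟨by simp, ?_⟩
          intro d hd
          rcases List.mem_cons.mp hd with rfl | hd
          · simpa using hc
          · simpa using (List.mem_takeWhile_imp hd)
        · refine ih _ ?_ w h
          have := List.length_dropWhile_le (fun d => !PySem.Chars.isspace d) rest
          simp at hlen; omega

theorem words_mem {cs w : List Char} (hw : w ∈ words cs) :
    w ≠ [] ∧ ∀ d ∈ w, PySem.Chars.isspace d = false :=
  words_mem_aux cs.length cs le_rfl w hw

theorem words_eq_nil_iff {cs : List Char} :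
    words cs = [] ↔ ∀ c ∈ cs, PySem.Chars.isspace c = true := by
  constructor
  · intro h
    induction cs with
    | nil => simp
    | cons c rest ih =>
      by_cases hc : PySem.Chars.isspace c = true
      · rw [words_cons_space rest hc] at h
        intro d hd
        rcases List.mem_cons.mp hd with rfl | hd
        · exact hc
        · exact ih h d hd
      · rw [words_cons_nonspace rest (by simpa using hc)] at h
        simp at h
  · exact words_all_space

theorem words_word_append {w v : List Char} (hw : w ≠ [])
    (hall : ∀ d ∈ w, PySem.Chars.isspace d = false)
    (hv : v = [] ∨ ∃ d t, v = d :: t ∧ PySem.Chars.isspace d = true) :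
    words (w ++ v) = w :: words v := by
  match w with
  | [] => exact absurd rfl hw
  | c :: w' =>
    rw [List.cons_append, words_cons_nonspace _ (hall c (by simp))]
    have htk : (w' ++ v).takeWhile (fun d => !PySem.Chars.isspace d) = w' := by
      rw [List.takeWhile_append_of_pos (by intro x hx; simpa using hall x (by simp [hx]))]
      rcases hv with rfl | ⟨d, t, rfl, hd⟩
      · simp
      · simp [hd]
    have hdr : (w' ++ v).dropWhile (fun d => !PySem.Chars.isspace d) = v := by
      rw [List.dropWhile_append_of_pos (by intro x hx; simpa using hall x (by simp [hx]))]
      rcases hv with rfl | ⟨d, t, rfl, hd⟩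
      · simp
      · simp [hd]
    rw [htk, hdr]

theorem go_spec : ∀ (cs cur : List Char) (acc : List (List Char)),
    (∀ x ∈ cur, PySem.Chars.isspace x = false) →
    PySem.Chars.split₀.go cs cur acc = acc.reverse ++ words (cur.reverse ++ cs) := by
  intro cs
  induction cs with
  | nil =>
    intro cur acc hcur
    rw [PySem.Chars.split₀.go]
    match cur with
    | [] => simp [words_nil]
    | c :: cur' =>
      have hw : words (cur'.reverse ++ [c]) = [cur'.reverse ++ [c]] := by
        have := words_word_append (w := cur'.reverse ++ [c]) (by simp)
          (by intro d hd; apply hcur; simp at hd ⊢; tauto) (Or.inl rfl)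
        simpa [words_nil] using this
      simp [hw]
  | cons c rest ih =>
    intro cur acc hcur
    rw [PySem.Chars.split₀.go]
    by_cases hc : PySem.Chars.isspace c = true
    · simp only [hc, if_true]
      match cur with
      | [] =>
        simp only [List.isEmpty_nil, if_true]
        rw [ih [] acc (by simp)]
        simp [words_cons_space rest hc]
      | x :: cur' =>
        have hw : words ((cur'.reverse ++ [x]) ++ (c :: rest)) =
            (cur'.reverse ++ [x]) :: words (c :: rest) := by
          refine words_word_append (by simp)
            (by intro d hd; apply hcur; simp at hd ⊢; tauto) (Or.inr ⟨c, rest, rfl, hc⟩)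
        have hw2 : words (cur'.reverse ++ x :: c :: rest) = (cur'.reverse ++ [x]) :: words rest := by
          rw [show cur'.reverse ++ x :: c :: rest = (cur'.reverse ++ [x]) ++ (c :: rest) by simp,
            hw, words_cons_space rest hc]
        rw [if_neg (by simp), ih [] ((x :: cur').reverse :: acc) (by simp)]
        simp [hw2]
    · simp only [hc]
      rw [ih (c :: cur) acc (by
        intro x hx
        rcases List.mem_cons.mp hx with rfl | hx
        · simpa using hc
        · exact hcur x hx)]
      simp

theorem split₀_eq_words (cs : List Char) : PySem.Chars.split₀ cs = words cs := by
  have := go_spec cs [] [] (by simp)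
  simpa [PySem.Chars.split₀] using this

theorem intercalate_eq_nfW : ∀ ws : List (List Char), List.intercalate [' '] ws = nfW ws
  | [] => by simp [List.intercalate, nfW]
  | [w] => by simp [List.intercalate, nfW]
  | w :: x :: t => by
    have h1 : List.intercalate [' '] (w :: x :: t) = w ++ [' '] ++ List.intercalate [' '] (x :: t) := by
      simp [List.intercalate, List.intersperse]
    rw [h1, intercalate_eq_nfW (x :: t)]
    simp [nfW]

theorem normA_eq_nf (cs : List Char) : normA cs = nf cs := by
  unfold normA nf PySem.Chars.join
  rw [split₀_eq_words, intercalate_eq_nfW]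

-- back-append lemmas: how one more character changes the word list
theorem tw_append_of_not_all {p : Char → Bool} {rest v : List Char}
    (h : ¬ ∀ d ∈ rest, p d = true) :
    (rest ++ v).takeWhile p = rest.takeWhile p ∧ (rest ++ v).dropWhile p = rest.dropWhile p ++ v := by
  constructor
  · rw [List.takeWhile_append, if_neg]
    intro hlen
    exact h (by
      have := (List.takeWhile_prefix (l := rest) (p := p)).eq_of_length hlen
      intro d hd
      exact List.mem_takeWhile_imp (this ▸ hd))
  · rw [List.dropWhile_append, if_neg]
    simp only [List.isEmpty_iff, List.dropWhile_eq_nil_iff]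
    exact h

theorem words_append_space_aux {x : Char} (hx : PySem.Chars.isspace x = true) :
    ∀ (N : Nat) (cand : List Char), cand.length ≤ N → words (cand ++ [x]) = words cand := by
  intro N
  induction N with
  | zero =>
    intro cand h
    have : cand = [] := List.length_eq_zero_iff.mp (Nat.le_zero.mp h)
    subst this
    simp [words_cons_space [] hx, words_nil]
  | succ n ih =>
    intro cand hlen
    match cand with
    | [] => simp [words_cons_space [] hx, words_nil]
    | c :: rest =>
      by_cases hc : PySem.Chars.isspace c = true
      · rw [List.cons_append, words_cons_space _ hc, words_cons_space _ hc]
        exact ih rest (by simpa using Nat.le_of_succ_le_succ hlen)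
      · rw [List.cons_append, words_cons_nonspace _ (by simpa using hc),
          words_cons_nonspace _ (by simpa using hc)]
        by_cases hall : ∀ d ∈ rest, (fun d => !PySem.Chars.isspace d) d = true
        · have htk : rest.takeWhile (fun d => !PySem.Chars.isspace d) = rest :=
            List.takeWhile_eq_self_iff.mpr hall
          have hdr : rest.dropWhile (fun d => !PySem.Chars.isspace d) = [] :=
            List.dropWhile_eq_nil_iff.mpr hall
          rw [List.takeWhile_append, if_pos (by rw [htk]), htk, hdr]
          rw [List.dropWhile_append, if_pos (by simp [hdr])]
          simp [hx, words_cons_space [] hx, words_nil]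
        · obtain ⟨htk, hdr⟩ := tw_append_of_not_all (v := [x]) hall
          rw [htk, hdr]
          have hrec := ih (rest.dropWhile (fun d => !PySem.Chars.isspace d)) (by
            have := List.length_dropWhile_le (fun d => !PySem.Chars.isspace d) rest
            simp at hlen; omega)
          rw [hrec]

theorem words_append_space {x : Char} (cand : List Char) (hx : PySem.Chars.isspace x = true) :
    words (cand ++ [x]) = words cand :=
  words_append_space_aux hx cand.length cand le_rfl

theorem words_single_nonspace {x : Char} (hx : PySem.Chars.isspace x = false) :
    words [x] = [[x]] := by
  rw [words_cons_nonspace [] hx]; simp [words_nil]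

theorem getLast?_dropWhile {p : Char → Bool} {rest : List Char}
    (h : rest.dropWhile p ≠ []) : (rest.dropWhile p).getLast? = rest.getLast? := by
  conv_rhs => rw [← List.takeWhile_append_dropWhile (p := p) (l := rest)]
  rw [List.getLast?_append, Option.or_of_isSome (by simpa [List.getLast?_isSome] using h)]

theorem words_append_break_aux {x : Char} (hx : PySem.Chars.isspace x = false) :
    ∀ (N : Nat) (cand : List Char), cand.length ≤ N →
    (cand = [] ∨ ∃ l, cand.getLast? = some l ∧ PySem.Chars.isspace l = true) →
    words (cand ++ [x]) = words cand ++ [[x]] := by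
  intro N
  induction N with
  | zero =>
    intro cand hlen _
    have : cand = [] := List.length_eq_zero_iff.mp (Nat.le_zero.mp hlen)
    subst this
    simp [words_single_nonspace hx, words_nil]
  | succ n ih =>
    intro cand hlen hlast
    match cand with
    | [] => simp [words_single_nonspace hx, words_nil]
    | c :: rest =>
      by_cases hc : PySem.Chars.isspace c = true
      · rw [List.cons_append, words_cons_space _ hc, words_cons_space _ hc]
        match rest with
        | [] => simp [words_single_nonspace hx, words_nil]
        | r :: rest' =>
          refine ih (r :: rest') (by simpa using Nat.le_of_succ_le_succ hlen) ?_
          rcases hlast with h | ⟨l, hl, hsl⟩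
          · simp at h
          · exact Or.inr ⟨l, by rw [← hl]; simp [List.getLast?_cons_cons], hsl⟩
      · -- head non-space: the last char is a space, so rest contains a space
        rcases hlast with h | ⟨l, hl, hsl⟩
        · simp at h
        · have hrest_ne : rest ≠ [] := by
            intro he; subst he
            simp [List.getLast?_singleton] at hl
            subst hl; simp [hsl] at hc
          have hlast_rest : rest.getLast? = some l := by
            rw [← hl]; rcases List.exists_cons_of_ne_nil hrest_ne with ⟨a, t, he⟩
            rw [he, List.getLast?_cons_cons]
          have hnotall : ¬ ∀ d ∈ rest, (fun d => !PySem.Chars.isspace d) d = true := by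
            intro hall
            have := hall l (List.mem_of_getLast? (by simpa using hlast_rest))
            simp [hsl] at this
          obtain ⟨htk, hdr⟩ := tw_append_of_not_all (v := [x]) hnotall
          rw [List.cons_append, words_cons_nonspace _ (by simpa using hc),
            words_cons_nonspace _ (by simpa using hc), htk, hdr]
          have hdrne : rest.dropWhile (fun d => !PySem.Chars.isspace d) ≠ [] := by
            intro he
            exact hnotall (List.dropWhile_eq_nil_iff.mp he)
          have hrec := ih (rest.dropWhile (fun d => !PySem.Chars.isspace d)) (by
              have := List.length_dropWhile_le (fun d => !PySem.Chars.isspace d) rest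
              simp at hlen; omega)
            (Or.inr ⟨l, by rw [getLast?_dropWhile hdrne]; exact hlast_rest, hsl⟩)
          rw [hrec]
          simp

theorem words_append_break {x : Char} (cand : List Char) (hx : PySem.Chars.isspace x = false)
    (h : cand = [] ∨ ∃ l, cand.getLast? = some l ∧ PySem.Chars.isspace l = true) :
    words (cand ++ [x]) = words cand ++ [[x]] :=
  words_append_break_aux hx cand.length cand le_rfl h

theorem words_append_extend_aux {x : Char} (hxns : PySem.Chars.isspace x = false) :
    ∀ (N : Nat) (cand : List Char), cand.length ≤ N →
    ∀ l, cand.getLast? = some l → PySem.Chars.isspace l = false →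
    ∃ ws w, words cand = ws ++ [w] ∧ words (cand ++ [x]) = ws ++ [w ++ [x]] := by
  intro N
  induction N with
  | zero =>
    intro cand hlen l hl _
    have : cand = [] := List.length_eq_zero_iff.mp (Nat.le_zero.mp hlen)
    subst this; simp at hl
  | succ n ih =>
    intro cand hlen l hl hlns
    match cand with
    | [] => simp at hl
    | c :: rest =>
      by_cases hc : PySem.Chars.isspace c = true
      · have hrest_ne : rest ≠ [] := by
          intro he; subst he
          simp [List.getLast?_singleton] at hl
          subst hl; simp [hc] at hlns
        have hlast_rest : rest.getLast? = some l := by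
          rw [← hl]; rcases List.exists_cons_of_ne_nil hrest_ne with ⟨a, t, he⟩
          rw [he, List.getLast?_cons_cons]
        rw [List.cons_append, words_cons_space _ hc, words_cons_space _ hc]
        exact ih rest (by simpa using Nat.le_of_succ_le_succ hlen) l hlast_rest hlns
      · by_cases hall : ∀ d ∈ rest, (fun d => !PySem.Chars.isspace d) d = true
        · have htk : rest.takeWhile (fun d => !PySem.Chars.isspace d) = rest :=
            List.takeWhile_eq_self_iff.mpr hall
          have hdr : rest.dropWhile (fun d => !PySem.Chars.isspace d) = [] :=
            List.dropWhile_eq_nil_iff.mpr hall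
          refine ⟨[], c :: rest, ?_, ?_⟩
          · rw [words_cons_nonspace _ (by simpa using hc), htk, hdr, words_nil]
            simp
          · rw [List.cons_append, words_cons_nonspace _ (by simpa using hc)]
            have htk2 : (rest ++ [x]).takeWhile (fun d => !PySem.Chars.isspace d) = rest ++ [x] :=
              List.takeWhile_eq_self_iff.mpr (by
                intro d hd
                rcases List.mem_append.mp hd with h | h
                · exact hall d h
                · simp at h; subst h; simpa using hxns)
            have hdr2 : (rest ++ [x]).dropWhile (fun d => !PySem.Chars.isspace d) = [] :=
              List.dropWhile_eq_nil_iff.mpr (by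
                intro d hd
                rcases List.mem_append.mp hd with h | h
                · exact hall d h
                · simp at h; subst h; simpa using hxns)
            rw [htk2, hdr2, words_nil]
            simp
        · obtain ⟨htk, hdr⟩ := tw_append_of_not_all (v := [x]) hall
          have hdrne : rest.dropWhile (fun d => !PySem.Chars.isspace d) ≠ [] := by
            intro he
            exact hall (List.dropWhile_eq_nil_iff.mp he)
          have hrest_ne : rest ≠ [] := by
            intro he; subst he; simp at hdrne
          have hlast_rest : rest.getLast? = some l := by
            rw [← hl]; rcases List.exists_cons_of_ne_nil hrest_ne with ⟨a, t, he⟩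
            rw [he, List.getLast?_cons_cons]
          obtain ⟨ws', w', hw1, hw2⟩ := ih (rest.dropWhile (fun d => !PySem.Chars.isspace d)) (by
              have := List.length_dropWhile_le (fun d => !PySem.Chars.isspace d) rest
              simp at hlen; omega)
            l (by rw [getLast?_dropWhile hdrne]; exact hlast_rest) hlns
          refine ⟨(c :: rest.takeWhile (fun d => !PySem.Chars.isspace d)) :: ws', w', ?_, ?_⟩
          · rw [words_cons_nonspace _ (by simpa using hc), hw1]
            simp
          · rw [List.cons_append, words_cons_nonspace _ (by simpa using hc), htk, hdr, hw2]
            simp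

theorem words_append_extend {x : Char} {cand : List Char} {l : Char}
    (hl : cand.getLast? = some l) (hx : PySem.Chars.isspace l = false)
    (hxns : PySem.Chars.isspace x = false) :
    ∃ ws w, words cand = ws ++ [w] ∧ words (cand ++ [x]) = ws ++ [w ++ [x]] :=
  words_append_extend_aux hxns cand.length cand le_rfl l hl hx

theorem nfW_append_singleton : ∀ (ws : List (List Char)) (w : List Char),
    nfW (ws ++ [w]) = nfW ws ++ (if ws = [] then w else ' ' :: w)
  | [], w => by simp [nfW]
  | [x], w => by simp [nfW]
  | x :: y :: t, w => by
    have := nfW_append_singleton (y :: t) w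
    simp only [List.cons_append, nfW] at this ⊢
    rw [this]
    simp

-- nf-level consequences
theorem nf_append_space {x : Char} (cand : List Char) (hx : PySem.Chars.isspace x = true) :
    nf (cand ++ [x]) = nf cand := by
  unfold nf; rw [words_append_space cand hx]

theorem nf_append_break {x : Char} (cand : List Char) (hx : PySem.Chars.isspace x = false)
    (h : cand = [] ∨ ∃ l, cand.getLast? = some l ∧ PySem.Chars.isspace l = true) :
    nf (cand ++ [x]) = nf cand ++ (if words cand = [] then [x] else [' ', x]) := by
  unfold nf
  rw [words_append_break cand hx h, nfW_append_singleton]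

theorem nf_append_extend {x : Char} {cand : List Char} {l : Char}
    (hl : cand.getLast? = some l) (hx : PySem.Chars.isspace l = false)
    (hxns : PySem.Chars.isspace x = false) :
    nf (cand ++ [x]) = nf cand ++ [x] := by
  obtain ⟨ws, w, hw1, hw2⟩ := words_append_extend hl hx hxns
  unfold nf
  rw [hw1, hw2, nfW_append_singleton, nfW_append_singleton]
  by_cases hws : ws = [] <;> simp [hws]

theorem nf_prefix_append_char (cand : List Char) (x : Char) :
    nf cand <+: nf (cand ++ [x]) := by
  by_cases hx : PySem.Chars.isspace x = true
  · rw [nf_append_space cand hx]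
  · match hgl : cand.getLast? with
    | none =>
      rw [nf_append_break cand (by simpa using hx) (Or.inl (by simpa using hgl))]
      exact List.prefix_append _ _
    | some l =>
      by_cases hls : PySem.Chars.isspace l = true
      · rw [nf_append_break cand (by simpa using hx) (Or.inr ⟨l, hgl, hls⟩)]
        exact List.prefix_append _ _
      · rw [nf_append_extend hgl (by simpa using hls) (by simpa using hx)]
        exact List.prefix_append _ _

-- once nf cand is not a prefix of S, no extension ever normalizes to S
theorem scan_none_of_not_prefix {S : List Char} (cand rest : List Char) (j : Nat)
    (h : ¬ nf cand <+: S) : scan S cand rest j = none := by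
  induction rest generalizing cand j with
  | nil => rw [scan]
  | cons c rs ih =>
    rw [scan]
    have hnp : ¬ nf (cand ++ [c]) <+: S := by
      intro hp
      exact h ((nf_prefix_append_char cand c).trans hp)
    rw [if_neg (by intro he; exact hnp (he ▸ List.prefix_rfl))]
    exact ih _ _ hnp

theorem scan_none_of_long {S : List Char} (cand rest : List Char) (j : Nat)
    (h : S.length < (nf cand).length) : scan S cand rest j = none := by
  refine scan_none_of_not_prefix cand rest j ?_
  intro hp
  exact absurd hp.length_le (by omega)

-- A's inner loop is the plain first-hit scan (the break never cuts off a hit)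
theorem innerA_eq_scan (S : List Char) (cand rest : List Char) (j : Nat) :
    innerA S cand rest j = scan S cand rest j := by
  induction rest generalizing cand j with
  | nil => rw [innerA, scan]
  | cons c rs ih =>
    rw [innerA, scan]
    simp only [normA_eq_nf]
    by_cases he : nf (cand ++ [c]) = S
    · simp [he]
    · rw [if_neg he, if_neg he]
      by_cases hlong : S.length < (nf (cand ++ [c])).length
      · rw [if_pos hlong, scan_none_of_long _ _ _ hlong]
      · rw [if_neg hlong]
        exact ih _ _

theorem scan_spaces {S : List Char} (cand : List Char) (run rest : List Char) (j : Nat)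
    (hrun : ∀ d ∈ run, PySem.Chars.isspace d = true) (hne : nf cand ≠ S) :
    scan S cand (run ++ rest) j = scan S (cand ++ run) rest (j + run.length) := by
  induction run generalizing cand j with
  | nil => simp
  | cons d run' ih =>
    have hd : PySem.Chars.isspace d = true := hrun d (by simp)
    have hnf : nf (cand ++ [d]) = nf cand := nf_append_space cand hd
    rw [List.cons_append, scan, if_neg (by rw [hnf]; exact hne)]
    have := ih (cand ++ [d]) (j + 1) (fun e he => hrun e (by simp [he])) (by rw [hnf]; exact hne)
    rw [this]
    simp only [List.append_assoc, List.singleton_append, List.length_cons]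
    congr 1
    omega

-- B's matcher is the same first-hit scan
theorem words_append_all_space : ∀ (run : List Char), (∀ d ∈ run, PySem.Chars.isspace d = true) →
    ∀ cand, words (cand ++ run) = words cand := by
  intro run
  induction run using List.reverseRecOn with
  | nil => intro _ cand; simp
  | append_singleton ys y ih =>
    intro h cand
    rw [← List.append_assoc, words_append_space _ (h y (by simp))]
    exact ih (fun d hd => h d (by simp [hd])) cand

theorem nf_append_all_space {run : List Char} (h : ∀ d ∈ run, PySem.Chars.isspace d = true)
    (cand : List Char) : nf (cand ++ run) = nf cand := by
  unfold nf; rw [words_append_all_space run h cand]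

theorem words_ne_nil_of_getLast {cand : List Char} {l : Char}
    (hl : cand.getLast? = some l) (hns : PySem.Chars.isspace l = false) : words cand ≠ [] := by
  intro h
  have := words_eq_nil_iff.mp h l (List.mem_of_getLast? hl)
  simp [this] at hns

theorem nf_nil : nf [] = [] := by unfold nf; rw [words_nil]; rfl

theorem nf_ne_S {S cand srem : List Char} (hS : S = nf cand ++ srem) (hsne : srem ≠ []) :
    nf cand ≠ S := by
  rw [hS]
  intro h
  exact hsne (by simpa using h)

theorem runB_eq_scan (S : List Char) : ∀ (N : Nat) (rest : List Char), rest.length ≤ N →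
    ∀ (cand srem : List Char) (j : Nat),
    ((S = nf cand ++ srem ∧ srem ≠ [] ∧
       (cand = [] → rest = [] ∨ ∃ c rs, rest = c :: rs ∧ PySem.Chars.isspace c = false) ∧
       (∀ l, cand.getLast? = some l → PySem.Chars.isspace l = false)) ∨
     (words cand ≠ [] ∧ (∃ l, cand.getLast? = some l ∧ PySem.Chars.isspace l = true) ∧
       S = nf cand ++ ' ' :: srem ∧
       (rest = [] ∨ ∃ c rs, rest = c :: rs ∧ PySem.Chars.isspace c = false))) →
    runB srem rest j = scan S cand rest j := by
  intro N
  induction N with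
  | zero =>
    intro rest hlen cand srem j _
    have : rest = [] := List.length_eq_zero_iff.mp (Nat.le_zero.mp hlen)
    subst this
    rw [runB, scan]
  | succ n ih =>
    intro rest hlen cand srem j hinv
    match rest with
    | [] => rw [runB, scan]
    | c :: rs =>
      have hrs_le : rs.length ≤ n := by simp at hlen; omega
      by_cases hc : PySem.Chars.isspace c = true
      · -- whitespace run in sql
        rcases hinv with ⟨hS, hsne, hcnil, hlast⟩ | ⟨_, _, _, hhead⟩
        swap
        · rcases hhead with he | ⟨c', rs', he, hns⟩
          · exact absurd he (by simp)
          · injection he with h1 _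
            rw [← h1, hc] at hns
            simp at hns
        have hcand_ne : cand ≠ [] := by
          intro he
          rcases hcnil he with h | ⟨c', rs', h, hns⟩
          · simp at h
          · injection h with h1 _
            rw [← h1, hc] at hns
            simp at hns
        obtain ⟨l, hgl⟩ : ∃ l, cand.getLast? = some l :=
          Option.isSome_iff_exists.mp (by simpa [List.getLast?_isSome] using hcand_ne)
        have hlns := hlast l hgl
        have hrun_all : ∀ d ∈ c :: rs.takeWhile PySem.Chars.isspace, PySem.Chars.isspace d = true := by
          intro d hd
          rcases List.mem_cons.mp hd with rfl | hd
          · exact hc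
          · exact List.mem_takeWhile_imp hd
        have hsplit : c :: rs = (c :: rs.takeWhile PySem.Chars.isspace) ++ rs.dropWhile PySem.Chars.isspace := by
          simp [List.takeWhile_append_dropWhile]
        have hne : nf cand ≠ S := nf_ne_S hS hsne
        rw [runB.eq_def]
        simp only [hc, if_true]
        conv_rhs => rw [hsplit]
        rw [scan_spaces cand _ _ j hrun_all hne]
        by_cases hre : rs.dropWhile PySem.Chars.isspace = []
        · rw [if_pos hre, hre, scan]
        · rw [if_neg hre]
          obtain ⟨d, rs', hd⟩ := List.exists_cons_of_ne_nil hre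
          have hdns : PySem.Chars.isspace d = false := by
            have := List.head_dropWhile_not PySem.Chars.isspace (l := rs) hre
            simp only [hd, List.head_cons] at this
            exact this
          have hwords : words (cand ++ (c :: rs.takeWhile PySem.Chars.isspace)) = words cand :=
            words_append_all_space _ hrun_all cand
          have hnf2 : nf (cand ++ (c :: rs.takeWhile PySem.Chars.isspace)) = nf cand :=
            nf_append_all_space hrun_all cand
          obtain ⟨lr, hlr⟩ : ∃ lr, (c :: rs.takeWhile PySem.Chars.isspace).getLast? = some lr :=
            Option.isSome_iff_exists.mp (by simp [List.getLast?_isSome])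
          have hglr : (cand ++ (c :: rs.takeWhile PySem.Chars.isspace)).getLast? = some lr := by
            rw [List.getLast?_append_of_ne_nil _ (by simp)]
            exact hlr
          have hlrs : PySem.Chars.isspace lr = true := hrun_all lr (List.mem_of_getLast? hlr)
          split
          · -- search exhausted: impossible under the invariant
            exact absurd rfl hsne
          · rename_i s srem''
            by_cases hs : s = ' '
            · subst hs
              rw [if_pos rfl]
              rw [show (j + (1 + (rs.takeWhile PySem.Chars.isspace).length)) = j + (c :: rs.takeWhile PySem.Chars.isspace).length by simp only [List.length_cons]; omega]
              refine ih (rs.dropWhile PySem.Chars.isspace)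
                (le_trans (List.length_dropWhile_le _ _) hrs_le)
                (cand ++ (c :: rs.takeWhile PySem.Chars.isspace)) srem'' _ (Or.inr ?_)
              refine ⟨?_, ⟨lr, hglr, hlrs⟩, ?_, Or.inr ⟨d, rs', hd, hdns⟩⟩
              · rw [hwords]
                exact words_ne_nil_of_getLast hgl hlns
              · rw [hnf2, ← hS]
            · -- the search string does not have a ' ' here: both sides fail
              rw [if_neg hs]
              have hnfd : nf ((cand ++ (c :: rs.takeWhile PySem.Chars.isspace)) ++ [d]) = nf cand ++ [' ', d] := by
                rw [nf_append_break _ hdns (Or.inr ⟨lr, hglr, hlrs⟩), if_neg (by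
                  rw [hwords]; exact words_ne_nil_of_getLast hgl hlns), hnf2]
              rw [hd, scan, if_neg (by
                rw [hnfd, hS]
                intro h
                have := List.append_cancel_left h
                injection this with h1 _
                exact hs h1.symm)]
              refine (scan_none_of_not_prefix _ _ _ ?_).symm
              rw [hnfd, hS]
              intro hp
              have := (List.prefix_append_right_inj (nf cand)).mp hp
              exact hs (List.cons_prefix_cons.mp this).1.symm
      · -- non-space character
        have hcf : PySem.Chars.isspace c = false := by simpa using hc
        rw [runB.eq_def]
        simp only [hcf, Bool.false_eq_true, if_false]
        rcases hinv with ⟨hS, hsne, _, hlast⟩ | ⟨hwne, ⟨l, hgl, hls⟩, hS, _⟩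
        · have hnfc : nf (cand ++ [c]) = nf cand ++ [c] := by
            match hgl : cand.getLast? with
            | none =>
              have hce : cand = [] := List.getLast?_eq_none_iff.mp hgl
              subst hce
              rw [nf_append_break [] (by simpa using hc) (Or.inl rfl), if_pos words_nil, nf_nil]
            | some l => exact nf_append_extend hgl (hlast l hgl) (by simpa using hc)
          split
          · rename_i s srem'
            rw [scan]
            by_cases hs : s = c
            · subst hs
              by_cases hsr : srem' = []
              · subst hsr
                rw [if_pos rfl, if_pos rfl, if_pos (by rw [hnfc, hS])]
              · rw [if_pos rfl, if_neg hsr, if_neg (by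
                  rw [hnfc, hS]
                  intro h
                  have := List.append_cancel_left h
                  injection this with _ h2
                  exact hsr h2.symm)]
                refine ih rs hrs_le (cand ++ [s]) srem' _ (Or.inl ?_)
                refine ⟨by rw [hnfc, hS, List.append_assoc]; rfl, hsr, by intro h; simp at h, ?_⟩
                intro l hl
                rw [List.getLast?_concat] at hl
                injection hl with hl
                rw [← hl]
                exact hcf
            · rw [if_neg (by intro h; exact hs h), if_neg (by
                rw [hnfc, hS]
                intro h
                have := List.append_cancel_left h
                injection this with h1 _
                exact hs h1.symm)]
              refine (scan_none_of_not_prefix _ _ _ ?_).symm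
              rw [hnfc, hS]
              intro hp
              have := (List.prefix_append_right_inj (nf cand)).mp hp
              exact hs (List.cons_prefix_cons.mp this).1.symm
          · exact absurd rfl hsne
        · -- pending-space state
          have hnfc : nf (cand ++ [c]) = nf cand ++ [' ', c] := by
            rw [nf_append_break cand (by simpa using hc) (Or.inr ⟨l, hgl, hls⟩), if_neg hwne]
          split
          · rename_i s srem'
            rw [scan]
            by_cases hs : s = c
            · subst hs
              by_cases hsr : srem' = []
              · subst hsr
                rw [if_pos rfl, if_pos rfl, if_pos (by rw [hnfc, hS])]
              · rw [if_pos rfl, if_neg hsr, if_neg (by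
                  rw [hnfc, hS]
                  intro h
                  have := List.append_cancel_left h
                  injection this with _ h2
                  injection h2 with _ h3
                  exact hsr h3.symm)]
                refine ih rs hrs_le (cand ++ [s]) srem' _ (Or.inl ?_)
                refine ⟨by rw [hnfc, hS]; simp, hsr, by intro h; simp at h, ?_⟩
                intro l' hl'
                rw [List.getLast?_concat] at hl'
                injection hl' with hl'
                rw [← hl']
                exact hcf
            · rw [if_neg (by intro h; exact hs h), if_neg (by
                rw [hnfc, hS]
                intro h
                have := List.append_cancel_left h
                injection this with _ h2
                injection h2 with h3 _
                exact hs h3.symm)]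
              refine (scan_none_of_not_prefix _ _ _ ?_).symm
              rw [hnfc, hS]
              intro hp
              have h1 := (List.prefix_append_right_inj (nf cand)).mp hp
              have h2 := (List.cons_prefix_cons.mp h1).2
              exact hs (List.cons_prefix_cons.mp h2).1.symm
          · -- search exhausted while a space is still owed: both sides fail
            rw [scan, if_neg (by
              rw [hnfc, hS]
              intro h
              have := List.append_cancel_left h
              simp at this)]
            refine (scan_none_of_not_prefix _ _ _ ?_).symm
            rw [hnfc, hS]
            intro hp
            have := (List.prefix_append_right_inj (nf cand)).mp hp
            have := this.length_le
            simp at this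

theorem scan_some_exists {S : List Char} : ∀ {cand rest : List Char} {j r : Nat},
    scan S cand rest j = some r →
    ∃ t, 1 ≤ t ∧ t ≤ rest.length ∧ nf (cand ++ rest.take t) = S := by
  intro cand rest
  induction rest generalizing cand with
  | nil => intro j r h; rw [scan] at h; exact absurd h (by simp)
  | cons c rs ih =>
    intro j r h
    rw [scan] at h
    by_cases he : nf (cand ++ [c]) = S
    · exact ⟨1, le_rfl, by simp, by simpa using he⟩
    · rw [if_neg he] at h
      obtain ⟨t, h1, h2, h3⟩ := ih h
      exact ⟨t + 1, by omega, by simpa using h2, by simpa [List.append_assoc] using h3⟩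

theorem words_nfW : ∀ {ws : List (List Char)},
    (∀ w ∈ ws, w ≠ [] ∧ ∀ d ∈ w, PySem.Chars.isspace d = false) → words (nfW ws) = ws
  | [], _ => words_nil
  | [w], h => by
    have hw := h w (by simp)
    rw [show nfW [w] = w from rfl]
    have := words_word_append hw.1 hw.2 (Or.inl rfl)
    simpa [words_nil] using this
  | w :: z :: t, h => by
    have hw := h w (by simp)
    rw [show nfW (w :: z :: t) = w ++ ' ' :: nfW (z :: t) from rfl]
    rw [words_word_append hw.1 hw.2 (Or.inr ⟨' ', nfW (z :: t), rfl, by decide⟩)]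
    rw [words_cons_space _ (by decide)]
    rw [words_nfW (fun u hu => h u (by simp [hu]))]

-- a successful scan from a non-space start forces A's first-word prefix test to pass
theorem match_implies_prefix {S : List Char} {c : Char} {rs : List Char} {i r : Nat}
    (hc : PySem.Chars.isspace c = false) (hs : scan S [] (c :: rs) i = some r)
    {fw : List Char} {ws0 : List (List Char)} (hw : words S = fw :: ws0) :
    (c :: rs).take fw.length = fw := by
  obtain ⟨t, h1, h2, h3⟩ := scan_some_exists hs
  rw [List.nil_append] at h3
  -- words of S are the words of the matched slice u
  have hwu : words S = words ((c :: rs).take t) := by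
    rw [← h3]
    unfold nf
    exact words_nfW (fun u hu => words_mem hu)
  obtain ⟨u', hu⟩ : ∃ u', (c :: rs).take t = c :: u' := ⟨rs.take (t - 1), by
    match t, h1 with | t + 1, _ => simp⟩
  rw [hu, words_cons_nonspace _ hc] at hwu
  rw [hw] at hwu
  have hfw : fw = c :: u'.takeWhile (fun d => !PySem.Chars.isspace d) := by
    injection hwu
  -- fw is a prefix of c :: rs
  have hpre : fw <+: c :: rs := by
    rw [hfw]
    refine List.IsPrefix.trans ?_ (List.take_prefix t (c :: rs))
    rw [hu]
    exact List.cons_prefix_cons.mpr ⟨rfl, List.takeWhile_prefix _⟩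
  exact (List.prefix_iff_eq_take.mp hpre).symm

theorem outer_eq {S fw : List Char} {ws0 : List (List Char)} (hw : words S = fw :: ws0) :
    ∀ (i : Nat) (rest : List Char), outerA S fw i rest = outerB S i rest := by
  have hSne : S ≠ [] := by
    intro h
    rw [h, words_nil] at hw
    simp at hw
  intro i rest
  induction rest generalizing i with
  | nil => rw [outerA, outerB]
  | cons c rs ih =>
    rw [outerA, outerB]
    by_cases hc : PySem.Chars.isspace c = true
    · rw [if_pos hc, if_pos hc]
      exact ih (i + 1)
    · have hcf : PySem.Chars.isspace c = false := by simpa using hc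
      rw [if_neg hc, if_neg hc]
      have hscan : runB S (c :: rs) i = scan S [] (c :: rs) i :=
        runB_eq_scan S (c :: rs).length _ le_rfl [] S i
          (Or.inl ⟨by rw [nf_nil]; rfl, hSne, fun _ => Or.inr ⟨c, rs, rfl, hcf⟩, by simp⟩)
      have hinner : innerA S [] (c :: rs) i = scan S [] (c :: rs) i := innerA_eq_scan S [] _ i
      by_cases hpre : (c :: rs).take fw.length = fw
      · rw [if_pos hpre, hinner, hscan]
        cases hm : scan S [] (c :: rs) i with
        | none =>
          show outerA S fw (i + 1) rs = outerB S (i + 1) rs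
          exact ih (i + 1)
        | some r => rfl
      · rw [if_neg hpre]
        have hnone : scan S [] (c :: rs) i = none := by
          cases hm : scan S [] (c :: rs) i with
          | none => rfl
          | some r => exact absurd (match_implies_prefix hcf hm hw) hpre
        rw [hscan, hnone]
        show outerA S fw (i + 1) rs = outerB S (i + 1) rs
        exact ih (i + 1)

theorem outerB_none_of_all_space {S : List Char} (hS : ∀ c ∈ S, PySem.Chars.isspace c = true)
    (hne : S ≠ []) : ∀ (i : Nat) (rest : List Char), outerB S i rest = none := by
  intro i rest
  induction rest generalizing i with
  | nil => rw [outerB]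
  | cons c rs ih =>
    rw [outerB]
    by_cases hc : PySem.Chars.isspace c = true
    · rw [if_pos hc]
      exact ih (i + 1)
    · have hcf : PySem.Chars.isspace c = false := by simpa using hc
      rw [if_neg hc]
      obtain ⟨s, S', rfl⟩ : ∃ s S', S = s :: S' := by
        match S, hne with
        | s :: S', _ => exact ⟨s, S', rfl⟩
      have hruns : runB (s :: S') (c :: rs) i = none := by
        rw [runB.eq_def]
        simp only [hcf, Bool.false_eq_true, if_false]
        rw [if_neg (by
          intro h
          have := hS s (by simp)
          rw [h, hcf] at this
          simp at this)]
      rw [hruns]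
      exact ih (i + 1)

-- ===== VERDICT (by name: the statement is the Claim_ definition above) =====
theorem find_original_span_py_spec : Claim_equal_find_original_span_py := by
  intro sql s _
  unfold Spec_find_original_span_py find_original_span_py find_original_span_py_alt
  cases hw : words s.toList with
  | nil =>
    simp only [split₀_eq_words, hw]
    by_cases hS : s.toList = []
    · rw [if_pos trivial, if_pos hS]
    · rw [if_pos trivial, if_neg hS, outerB_none_of_all_space (words_eq_nil_iff.mp hw) hS 0 sql.toList]
  | cons fw ws0 =>
    have hfw_ne : fw ≠ [] :=
      (words_mem (cs := s.toList) (by rw [hw]; exact List.mem_cons_self)).1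
    have hSne : s.toList ≠ [] := by
      intro h
      rw [h, words_nil] at hw
      simp at hw
    simp only [split₀_eq_words, hw]
    rw [if_neg hfw_ne, if_neg hSne]
    exact outer_eq hw 0 sql.toList
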